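-- pv_equiv track=rewrite | github.com/milimarg/advent-of-code-2023 | day14/task02.py | push_o_on_east
-- ===== SOURCE A (Python) =====
-- def push_o_on_east(dish):
--     final = []
--
--     for i, line_ in enumerate(dish):
--         col = line_
--         o_indices = [i for i, line in enumerate(col) if 'O' in line]
--
--         for j in range(len(o_indices) - 1, -1, -1):
--             current_index = o_indices[j]
--             while current_index < len(col) - 1 and col[current_index + 1] != '#':
--                 col = list(col)
--                 col[current_index], col[current_index + 1] = col[current_index + 1], col[current_index]
--                 col = "".join(col)
--                 current_index += 1
--         final.append(col)
--     return final
-- ===== SOURCE B (Python) =====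
-- def push_o_on_east(dish):
--     final = []
--     for line in dish:
--         parts = []
--         for seg in line.split('#'):
--             rep = seg.replace('O', '')
--             parts.append(rep + 'O' * (len(seg) - len(rep)))
--         final.append('#'.join(parts))
--     return final
-- ===== Notes on version B (the rewrite author's own statement) =====
-- stated objective: faster
-- what changed: Instead of bubbling each 'O' rightward one swap at a time over a string rebuilt per swap, B splits each line on '#' and rebuilds every segment in one pass as its non-'O' characters (str.replace) followed by the right number of 'O's.
import Mathlib
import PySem

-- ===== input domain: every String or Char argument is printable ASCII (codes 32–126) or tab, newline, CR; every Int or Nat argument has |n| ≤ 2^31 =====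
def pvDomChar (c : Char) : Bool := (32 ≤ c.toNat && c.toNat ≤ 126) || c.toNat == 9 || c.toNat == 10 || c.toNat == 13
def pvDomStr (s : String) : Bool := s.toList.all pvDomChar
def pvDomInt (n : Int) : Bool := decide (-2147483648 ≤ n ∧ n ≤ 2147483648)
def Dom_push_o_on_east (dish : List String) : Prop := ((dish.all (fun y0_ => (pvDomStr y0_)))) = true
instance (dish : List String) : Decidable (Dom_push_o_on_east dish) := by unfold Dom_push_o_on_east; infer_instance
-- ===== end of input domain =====

-- B replaces A's per-'O' bubble sweeps (quadratic per line) by a single split-on-'#',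
-- pack-each-segment pass (linear per line); return value proved identical, no mutation involved.

-- ===== PORT A =====
-- [i for i, line in enumerate(col) if 'O' in line] : positions of 'O' (a 1-char string
-- contains 'O' iff it equals 'O'); hand port over List Char with a running index, exact.
def pvOIdx : List Char → Nat → List Nat
  | [], _ => []
  | c :: cs, i => if c = 'O' then i :: pvOIdx cs (i + 1) else pvOIdx cs (i + 1)

-- the inner `while` loop; fuel bounds the iterations (each one increments the index and
-- keeps the length, so fuel = col.length always suffices).  Python evaluates both sides of
-- the swap `col[i], col[i+1] = col[i+1], col[i]` from the ORIGINAL col, hence the two getD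
-- reads before the two sets.  Nat `length - 1` agrees with Python's `len(col) - 1` in the
-- comparison (for len = 0 both conditions are false).
def pvAWhile : Nat → List Char → Nat → List Char
  | 0, col, _ => col
  | fuel + 1, col, i =>
    if i < col.length - 1 ∧ col.getD (i + 1) ' ' ≠ '#' then
      pvAWhile fuel ((col.set i (col.getD (i + 1) ' ')).set (i + 1) (col.getD i ' ')) (i + 1)
    else col

-- `for j in range(len(o_indices)-1, -1, -1)` reads o_indices[j] right to left: a fold
-- over the reversed index list.
def pvLineA (col : List Char) : List Char :=
  ((pvOIdx col 0).reverse).foldl (fun c ci => pvAWhile c.length c ci) col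

def push_o_on_east (dish : List String) : List String :=
  dish.foldl (fun final line_ => final ++ [String.mk (pvLineA line_.toList)]) []

-- ===== PORT B =====
-- line.split('#') : exact port of str.split with a one-char separator.
def pvSplitHash : List Char → List (List Char)
  | [] => [[]]
  | c :: cs =>
    if c = '#' then [] :: pvSplitHash cs
    else
      match pvSplitHash cs with
      | [] => [[c]]          -- unreachable: pvSplitHash never returns []
      | s :: ss => (c :: s) :: ss

-- seg.replace('O', '') keeps exactly the non-'O' characters in order: filter;
-- rep + 'O' * (len(seg) - len(rep))
def pvPack (seg : List Char) : List Char :=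
  let rep := seg.filter (fun c => c ≠ 'O')
  rep ++ List.replicate (seg.length - rep.length) 'O'

-- '#'.join(...)
def pvJoinHash : List (List Char) → List Char
  | [] => []
  | [s] => s
  | s :: ss => s ++ '#' :: pvJoinHash ss

def pvLineB (col : List Char) : List Char :=
  pvJoinHash ((pvSplitHash col).map pvPack)

def push_o_on_east_alt (dish : List String) : List String :=
  dish.map (fun line_ => String.mk (pvLineB line_.toList))

-- ===== PRECONDITION & SPEC =====
def Spec_push_o_on_east (dish : List String) (out : List String) : Prop := out = push_o_on_east_alt dish
instance (dish : List String) (out : List String) : Decidable (Spec_push_o_on_east dish out) := by unfold Spec_push_o_on_east; infer_instance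

-- ===== CLAIM (what is proved, stated in full; the proofs are below) =====
def Claim_equal_push_o_on_east : Prop := ∀ (dish : List String), Dom_push_o_on_east dish → Spec_push_o_on_east dish (push_o_on_east dish)

-- ===== LEMMAS AND PROOFS =====

def pvFoldA (col : List Char) (idxs : List Nat) : List Char :=
  idxs.foldl (fun c ci => pvAWhile c.length c ci) col

theorem pvLineA_eq_foldA (col : List Char) :
    pvLineA col = pvFoldA col ((pvOIdx col 0).reverse) := rfl

-- basic indexing lemmas
theorem pv_getD_append_right (p l : List Char) (i : Nat) (d : Char) :
    (p ++ l).getD (p.length + i) d = l.getD i d := by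
  induction p with
  | nil => simp
  | cons c p ih => simpa [Nat.succ_add] using ih

theorem pv_set_append_right (p l : List Char) (i : Nat) (x : Char) :
    (p ++ l).set (p.length + i) x = p ++ l.set i x := by
  induction p with
  | nil => simp
  | cons c p ih => simpa [Nat.succ_add] using ih

theorem pvAWhile_stop (fuel : Nat) (l : List Char) (i : Nat) (h : l.length ≤ i + 1) :
    pvAWhile fuel l i = l := by
  cases fuel with
  | zero => rfl
  | succ f =>
    rw [pvAWhile, if_neg]
    rintro ⟨h1, -⟩; omega

theorem pvAWhile_fuel (fuel : Nat) : ∀ (g : Nat) (l : List Char) (i : Nat),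
    l.length ≤ i + fuel → l.length ≤ i + g → pvAWhile fuel l i = pvAWhile g l i := by
  induction fuel with
  | zero =>
    intro g l i hf hg
    rw [pvAWhile, pvAWhile_stop g l i (by omega)]
  | succ f ih =>
    intro g l i hf hg
    cases g with
    | zero => rw [pvAWhile_stop (f+1) l i (by omega)]; rfl
    | succ g' =>
      by_cases h : i < l.length - 1 ∧ l.getD (i + 1) ' ' ≠ '#'
      · rw [pvAWhile, if_pos h, pvAWhile, if_pos h]
        apply ih
        · simp; omega
        · simp; omega
      · rw [pvAWhile, if_neg h, pvAWhile, if_neg h]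

theorem pvAWhile_frame (fuel : Nat) : ∀ (p l : List Char) (i : Nat),
    pvAWhile fuel (p ++ l) (p.length + i) = p ++ pvAWhile fuel l i := by
  induction fuel with
  | zero => intro p l i; rfl
  | succ f ih =>
    intro p l i
    have h1 : (p ++ l).getD (p.length + i + 1) ' ' = l.getD (i + 1) ' ' := by
      rw [Nat.add_assoc]; exact pv_getD_append_right p l (i + 1) ' '
    have hcond : (p.length + i < (p ++ l).length - 1 ∧ (p ++ l).getD (p.length + i + 1) ' ' ≠ '#')
        ↔ (i < l.length - 1 ∧ l.getD (i + 1) ' ' ≠ '#') := by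
      rw [h1]
      simp only [List.length_append]
      constructor
      · rintro ⟨h2, h3⟩; exact ⟨by omega, h3⟩
      · rintro ⟨h2, h3⟩; exact ⟨by omega, h3⟩
    by_cases h : i < l.length - 1 ∧ l.getD (i + 1) ' ' ≠ '#'
    · rw [pvAWhile, if_pos (hcond.mpr h), pvAWhile, if_pos h]
      have e2 : (p ++ l).getD (p.length + i) ' ' = l.getD i ' ' := pv_getD_append_right p l i ' '
      rw [h1, e2, pv_set_append_right]
      have e3 : (p ++ l.set i (l.getD (i+1) ' ')).set (p.length + i + 1) (l.getD i ' ')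
          = p ++ (l.set i (l.getD (i+1) ' ')).set (i + 1) (l.getD i ' ') := by
        rw [Nat.add_assoc]
        exact pv_set_append_right p (l.set i (l.getD (i+1) ' ')) (i + 1) (l.getD i ' ')
      rw [e3]
      have := ih p ((l.set i (l.getD (i+1) ' ')).set (i + 1) (l.getD i ' ')) (i + 1)
      rw [← Nat.add_assoc] at this
      exact this
    · rw [pvAWhile, if_neg (fun hc => h (hcond.mp hc)), pvAWhile, if_neg h]

-- fold framing: sliding indices shifted past an untouched prefix acts on the suffix only
theorem pvFoldA_frame (idxs : List Nat) : ∀ (p l : List Char),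
    pvFoldA (p ++ l) (idxs.map (· + p.length)) = p ++ pvFoldA l idxs := by
  induction idxs with
  | nil => intro p l; rfl
  | cons i idxs ih =>
    intro p l
    show pvFoldA (pvAWhile (p ++ l).length (p ++ l) (i + p.length)) (idxs.map (· + p.length))
        = p ++ pvFoldA (pvAWhile l.length l i) idxs
    rw [Nat.add_comm i p.length, pvAWhile_frame,
        pvAWhile_fuel (p ++ l).length l.length l i (by simp; omega) (by omega)]
    exact ih p (pvAWhile l.length l i)

-- one 'O' at position pre.length slides right past mid (no '#') and stops before rest
theorem pvSlide (mid : List Char) : ∀ (pre rest : List Char) (fuel : Nat),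
    (∀ c ∈ mid, c ≠ '#') → (rest = [] ∨ ∃ r, rest = '#' :: r) → mid.length ≤ fuel →
    pvAWhile fuel (pre ++ 'O' :: (mid ++ rest)) pre.length = pre ++ mid ++ 'O' :: rest := by
  induction mid with
  | nil =>
    intro pre rest fuel _ hrest _
    cases fuel with
    | zero => simp [pvAWhile]
    | succ f =>
      rw [pvAWhile, if_neg]
      · simp
      rcases hrest with h | ⟨r, h⟩ <;> subst h
      · rintro ⟨h1, -⟩; simp at h1
      · rintro ⟨-, h2⟩
        exact h2 (by simpa using pv_getD_append_right pre ('O' :: '#' :: r) 1 ' ')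
  | cons m mid ih =>
    intro pre rest fuel hmid hrest hfuel
    cases fuel with
    | zero => simp at hfuel
    | succ f =>
      have hm : m ≠ '#' := hmid m (by simp)
      have eget1 : (pre ++ 'O' :: ((m :: mid) ++ rest)).getD (pre.length + 1) ' ' = m := by
        simpa using pv_getD_append_right pre ('O' :: m :: (mid ++ rest)) 1 ' '
      have eget0 : (pre ++ 'O' :: ((m :: mid) ++ rest)).getD pre.length ' ' = 'O' := by
        simpa using pv_getD_append_right pre ('O' :: m :: (mid ++ rest)) 0 ' '
      rw [pvAWhile, if_pos]
      · rw [eget1, eget0]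
        have s0 : (pre ++ 'O' :: ((m :: mid) ++ rest)).set pre.length m
            = pre ++ m :: m :: (mid ++ rest) := by
          simpa using pv_set_append_right pre ('O' :: m :: (mid ++ rest)) 0 m
        rw [s0]
        have s1 : (pre ++ m :: m :: (mid ++ rest)).set (pre.length + 1) 'O'
            = pre ++ m :: 'O' :: (mid ++ rest) := by
          simpa using pv_set_append_right pre (m :: m :: (mid ++ rest)) 1 'O'
        rw [s1]
        have hlen' : mid.length ≤ f := by simp at hfuel; omega
        have := ih (pre ++ [m]) rest f (fun c hc => hmid c (by simp [hc])) hrest hlen'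
        simpa [List.append_assoc] using this
      · refine ⟨by simp only [List.length_append, List.length_cons]; omega, ?_⟩
        rw [eget1]; exact hm

-- positions of 'O'
theorem pvOIdx_shift (l : List Char) : ∀ (s : Nat), pvOIdx l s = (pvOIdx l 0).map (· + s) := by
  induction l with
  | nil => intro s; rfl
  | cons c cs ih =>
    intro s
    by_cases h : c = 'O'
    · rw [pvOIdx, if_pos h, pvOIdx, if_pos h, ih (s + 1), ih 1]
      simp [Function.comp, Nat.add_comm, Nat.add_assoc, Nat.add_left_comm]
    · rw [pvOIdx, if_neg h, pvOIdx, if_neg h, ih (s + 1), ih 1]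
      simp [Function.comp, Nat.add_comm, Nat.add_assoc, Nat.add_left_comm]

theorem pvOIdx_append (a : List Char) : ∀ (b : List Char) (s : Nat),
    pvOIdx (a ++ b) s = pvOIdx a s ++ pvOIdx b (s + a.length) := by
  induction a with
  | nil => intro b s; simp [pvOIdx]
  | cons c a ih =>
    intro b s
    by_cases h : c = 'O'
    · simp only [List.cons_append, pvOIdx, if_pos h, ih b (s + 1), List.length_cons]
      rw [show s + 1 + a.length = s + (a.length + 1) by omega]
    · simp only [List.cons_append, pvOIdx, if_neg h, ih b (s + 1), List.length_cons]
      rw [show s + 1 + a.length = s + (a.length + 1) by omega]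

theorem pvOIdx_of_not_mem (l : List Char) (s : Nat) (h : 'O' ∉ l) : pvOIdx l s = [] := by
  induction l generalizing s with
  | nil => rfl
  | cons c cs ih =>
    rw [pvOIdx, if_neg (by intro hc; exact h (by simp [hc]))]
    exact ih (s + 1) (fun hm => h (by simp [hm]))

theorem pv_filter_of_not_mem (l : List Char) (h : 'O' ∉ l) :
    l.filter (fun c => c ≠ 'O') = l := by
  apply List.filter_eq_self.mpr
  intro c hc
  simp only [ne_eq, decide_eq_true_eq]
  intro he; exact h (he ▸ hc)

theorem pv_last_O (l : List Char) (h : 'O' ∈ l) :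
    ∃ a b, l = a ++ 'O' :: b ∧ 'O' ∉ b := by
  induction l with
  | nil => simp at h
  | cons c cs ih =>
    by_cases hm : 'O' ∈ cs
    · obtain ⟨a, b, rfl, hb⟩ := ih hm
      exact ⟨c :: a, b, rfl, hb⟩
    · have hc : c = 'O' := by
        rcases List.mem_cons.mp h with h' | h'
        · exact h'.symm
        · exact absurd h' hm
      exact ⟨[], cs, by simp [hc], hm⟩

theorem pv_first_hash (l : List Char) (h : '#' ∈ l) :
    ∃ a b, l = a ++ '#' :: b ∧ '#' ∉ a := by
  induction l with
  | nil => simp at h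
  | cons c cs ih =>
    by_cases hc : c = '#'
    · exact ⟨[], cs, by simp [hc], by simp⟩
    · have hm : '#' ∈ cs := by
        rcases List.mem_cons.mp h with h' | h'
        · exact absurd h'.symm hc
        · exact h'
      obtain ⟨a, b, rfl, ha⟩ := ih hm
      exact ⟨c :: a, b, rfl, by simp [ha, Ne.symm hc]⟩

-- the fold over a '#'-free block's 'O' positions, taken right to left, packs its 'O's
-- just before rest (mid carries already-settled material without '#')
theorem pvSegFold (n : Nat) : ∀ (s1 : List Char), s1.length ≤ n →
    (∀ c ∈ s1, c ≠ '#') → ∀ (pre mid rest : List Char),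
    (∀ c ∈ mid, c ≠ '#') → (rest = [] ∨ ∃ r, rest = '#' :: r) →
    pvFoldA (pre ++ s1 ++ mid ++ rest) (((pvOIdx s1 0).map (· + pre.length)).reverse)
      = pre ++ s1.filter (fun c => c ≠ 'O') ++ mid ++ List.replicate (s1.count 'O') 'O' ++ rest := by
  induction n with
  | zero =>
    intro s1 hlen _ pre mid rest _ _
    have : s1 = [] := List.eq_nil_of_length_eq_zero (by omega)
    subst this
    simp [pvOIdx, pvFoldA]
  | succ n ih =>
    intro s1 hlen hs1 pre mid rest hmid hrest
    by_cases hO : 'O' ∈ s1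
    · obtain ⟨a, b, rfl, hb⟩ := pv_last_O s1 hO
      have hidx : pvOIdx (a ++ 'O' :: b) 0 = pvOIdx a 0 ++ [a.length] := by
        rw [pvOIdx_append, pvOIdx, if_pos rfl, pvOIdx_of_not_mem b _ hb]
        simp
      rw [hidx]
      simp only [List.map_append, List.reverse_append, List.map_cons, List.map_nil,
        List.reverse_cons, List.reverse_nil, List.nil_append]
      show pvFoldA (pre ++ (a ++ 'O' :: b) ++ mid ++ rest)
          ((a.length + pre.length) :: ((pvOIdx a 0).map (· + pre.length)).reverse) = _
      have hshape : pre ++ (a ++ 'O' :: b) ++ mid ++ rest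
          = (pre ++ a) ++ 'O' :: ((b ++ mid) ++ rest) := by
        simp [List.append_assoc]
      rw [hshape]
      have hslide : pvAWhile ((pre ++ a) ++ 'O' :: ((b ++ mid) ++ rest)).length
            ((pre ++ a) ++ 'O' :: ((b ++ mid) ++ rest)) (pre ++ a).length
          = (pre ++ a) ++ (b ++ mid) ++ 'O' :: rest :=
        pvSlide (b ++ mid) (pre ++ a) rest _
          (fun c hc => by
            rcases List.mem_append.mp hc with h' | h'
            · exact hs1 c (by simp [h'])
            · exact hmid c h')
          hrest (by simp only [List.length_append, List.length_cons]; omega)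
      show pvFoldA (pvAWhile ((pre ++ a) ++ 'O' :: ((b ++ mid) ++ rest)).length
            ((pre ++ a) ++ 'O' :: ((b ++ mid) ++ rest)) (a.length + pre.length))
          (((pvOIdx a 0).map (· + pre.length)).reverse) = _
      rw [show a.length + pre.length = (pre ++ a).length by simp [Nat.add_comm]]
      rw [hslide]
      have hmid' : ∀ c ∈ b ++ mid ++ ['O'], c ≠ '#' := by
        intro c hc
        rcases List.mem_append.mp hc with h' | h'
        · rcases List.mem_append.mp h' with h'' | h''
          · exact hs1 c (by simp [h''])
          · exact hmid c h''
        · simp at h'; subst h'; decide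
      have hlen' : a.length ≤ n := by simp at hlen; omega
      have := ih a hlen' (fun c hc => hs1 c (by simp [hc])) pre (b ++ mid ++ ['O']) rest hmid' hrest
      have hshape2 : (pre ++ a) ++ (b ++ mid) ++ 'O' :: rest
          = pre ++ a ++ (b ++ mid ++ ['O']) ++ rest := by
        simp [List.append_assoc]
      rw [hshape2, this]
      have hfb : (a ++ 'O' :: b).filter (fun c => c ≠ 'O')
          = a.filter (fun c => c ≠ 'O') ++ b := by
        simp only [List.filter_append]
        congr 1
        simp only [List.filter_cons]
        rw [if_neg (by decide)]
        exact pv_filter_of_not_mem b hb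
      have hcb : (a ++ 'O' :: b).count 'O' = a.count 'O' + 1 := by
        have : b.count 'O' = 0 := List.count_eq_zero.mpr hb
        simp [List.count_append, this]
      rw [hfb, hcb]
      simp [List.append_assoc, List.replicate_succ]
    · have hc0 : s1.count 'O' = 0 := List.count_eq_zero.mpr hO
      rw [pvOIdx_of_not_mem s1 0 hO, hc0, pv_filter_of_not_mem s1 hO]
      simp [pvFoldA]

-- split / join lemmas for B
theorem pvSplitHash_ne_nil (l : List Char) : pvSplitHash l ≠ [] := by
  induction l with
  | nil => simp [pvSplitHash]
  | cons c cs ih =>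
    rw [pvSplitHash]
    by_cases h : c = '#'
    · simp [h]
    · rw [if_neg h]
      cases hs : pvSplitHash cs with
      | nil => simp
      | cons s ss => simp

theorem pvSplitHash_no_hash (l : List Char) (h : '#' ∉ l) : pvSplitHash l = [l] := by
  induction l with
  | nil => rfl
  | cons c cs ih =>
    rw [pvSplitHash, if_neg (by intro hc; exact h (by simp [hc]))]
    rw [ih (fun hm => h (by simp [hm]))]

theorem pvSplitHash_append (a b : List Char) (h : '#' ∉ a) :
    pvSplitHash (a ++ '#' :: b) = a :: pvSplitHash b := by
  induction a with
  | nil => simp [pvSplitHash]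
  | cons c a ih =>
    rw [List.cons_append, pvSplitHash, if_neg (by intro hc; exact h (by simp [hc]))]
    rw [ih (fun hm => h (by simp [hm]))]

theorem pvJoinHash_cons (s : List Char) (ss : List (List Char)) (h : ss ≠ []) :
    pvJoinHash (s :: ss) = s ++ '#' :: pvJoinHash ss := by
  cases ss with
  | nil => exact absurd rfl h
  | cons t ts => rfl

theorem pv_filter_length_add_count (l : List Char) :
    (l.filter (fun c => c ≠ 'O')).length + l.count 'O' = l.length := by
  induction l with
  | nil => rfl
  | cons c cs ih =>
    by_cases h : c = 'O'
    · subst h; simp [List.filter_cons, List.count_cons, ← ih]; omega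
    · simp [List.filter_cons, h, List.count_cons, ← ih]; omega

theorem pvPack_eq (seg : List Char) :
    pvPack seg = seg.filter (fun c => c ≠ 'O') ++ List.replicate (seg.count 'O') 'O' := by
  have h := pv_filter_length_add_count seg
  show seg.filter (fun c => c ≠ 'O')
      ++ List.replicate (seg.length - (seg.filter (fun c => c ≠ 'O')).length) 'O' = _
  rw [show seg.length - (seg.filter (fun c => c ≠ 'O')).length = seg.count 'O' by omega]

-- the per-line equivalence
theorem pvLine_eq (n : Nat) : ∀ (l : List Char), l.length ≤ n → pvLineA l = pvLineB l := by
  induction n with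
  | zero =>
    intro l hlen
    have : l = [] := List.eq_nil_of_length_eq_zero (by omega)
    subst this; rfl
  | succ n ih =>
    intro l hlen
    by_cases hh : '#' ∈ l
    · obtain ⟨seg, rest, rfl, hseg⟩ := pv_first_hash l hh
      rw [pvLineA_eq_foldA]
      have hidx : pvOIdx (seg ++ '#' :: rest) 0
          = pvOIdx seg 0 ++ (pvOIdx rest 0).map (· + (seg.length + 1)) := by
        rw [pvOIdx_append, pvOIdx, if_neg (by decide), pvOIdx_shift rest]
        simp
      rw [hidx, List.reverse_append, pvFoldA, List.foldl_append]
      have hframe : List.foldl (fun c ci => pvAWhile c.length c ci) (seg ++ '#' :: rest)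
            (((pvOIdx rest 0).map (· + (seg.length + 1))).reverse)
          = (seg ++ ['#']) ++ pvFoldA rest ((pvOIdx rest 0).reverse) := by
        have hsh : ((pvOIdx rest 0).map (· + (seg.length + 1))).reverse
            = ((pvOIdx rest 0).reverse).map (· + (seg ++ ['#']).length) := by
          simp [List.map_reverse]
        rw [hsh]
        have := pvFoldA_frame ((pvOIdx rest 0).reverse) (seg ++ ['#']) rest
        simpa [List.append_assoc, pvFoldA] using this
      rw [hframe]
      have hrest_eq : pvFoldA rest ((pvOIdx rest 0).reverse) = pvLineB rest := by
        rw [← pvLineA_eq_foldA]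
        exact ih rest (by simp at hlen; omega)
      rw [hrest_eq]
      have hseg_fold := pvSegFold seg.length seg le_rfl
          (fun c hc he => hseg (he ▸ hc)) [] [] ('#' :: pvLineB rest)
          (by simp) (Or.inr ⟨pvLineB rest, rfl⟩)
      have hmap0 : (pvOIdx seg 0).map (· + ([] : List Char).length) = pvOIdx seg 0 := by
        simp
      rw [hmap0] at hseg_fold
      simp only [List.nil_append, List.append_nil] at hseg_fold
      have hsx : (seg ++ ['#']) ++ pvLineB rest = seg ++ '#' :: pvLineB rest := by simp
      rw [hsx]
      show pvFoldA (seg ++ '#' :: pvLineB rest) ((pvOIdx seg 0).reverse) = _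
      rw [hseg_fold]
      have hjoin : pvJoinHash ((pvSplitHash (seg ++ '#' :: rest)).map pvPack)
          = pvPack seg ++ '#' :: pvJoinHash ((pvSplitHash rest).map pvPack) := by
        rw [pvSplitHash_append seg rest hseg, List.map_cons]
        exact pvJoinHash_cons _ _ (by
          intro hnil
          exact pvSplitHash_ne_nil rest (List.map_eq_nil_iff.mp hnil))
      show _ = pvLineB (seg ++ '#' :: rest)
      rw [show pvLineB (seg ++ '#' :: rest)
            = pvJoinHash ((pvSplitHash (seg ++ '#' :: rest)).map pvPack) from rfl, hjoin]
      simp [pvPack_eq, pvLineB, List.append_assoc]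
    · rw [pvLineA_eq_foldA]
      have hseg_fold := pvSegFold l.length l le_rfl
          (fun c hc he => hh (he ▸ hc)) [] [] []
          (by simp) (Or.inl rfl)
      have hmap0 : (pvOIdx l 0).map (· + ([] : List Char).length) = pvOIdx l 0 := by simp
      rw [hmap0] at hseg_fold
      simp only [List.nil_append, List.append_nil] at hseg_fold
      rw [hseg_fold]
      simp only [pvLineB, pvSplitHash_no_hash l hh, List.map_cons, List.map_nil]
      simp [pvJoinHash, pvPack_eq]

-- ===== VERDICT (by name: the statement is the Claim_ definition above) =====
theorem push_o_on_east_spec : Claim_equal_push_o_on_east := by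
  intro dish _
  unfold Spec_push_o_on_east push_o_on_east push_o_on_east_alt
  rw [PySem.List.foldl_append_singleton_eq_map]
  simp only [List.nil_append]
  apply List.map_congr_left
  intro line _
  rw [pvLine_eq line.toList.length line.toList le_rfl]
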